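-- pv_equiv track=rewrite | github.com/TAVEResearch/TAVE_algorithm_study | 이상원/programmers/LV1/0629_budget.py | solution
-- ===== SOURCE A (Python) =====
-- def solution(d, budget):
--     answer = 0
--     while True:
--         if len(d) == 0:
--             break
--         budget -= min(d)
--         if budget < 0:
--             break
--         answer += 1
--         d.remove(min(d))
--     return answer
-- ===== SOURCE B (Python) =====
-- def solution(d, budget):
--     # Sort ascending once, then accumulate costs greedily until the budget
--     # would go negative.  (Does not mutate d, unlike A; return value only.)
--     answer = 0
--     for cost in sorted(d):
--         budget -= cost
--         if budget < 0:
--             break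
--         answer += 1
--     return answer
-- ===== Notes on version B (the rewrite author's own statement) =====
-- stated objective: faster
-- what changed: Replaces the repeated min()+remove() scans over a shrinking list with one ascending sort followed by a single greedy prefix-sum pass.
import Mathlib
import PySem

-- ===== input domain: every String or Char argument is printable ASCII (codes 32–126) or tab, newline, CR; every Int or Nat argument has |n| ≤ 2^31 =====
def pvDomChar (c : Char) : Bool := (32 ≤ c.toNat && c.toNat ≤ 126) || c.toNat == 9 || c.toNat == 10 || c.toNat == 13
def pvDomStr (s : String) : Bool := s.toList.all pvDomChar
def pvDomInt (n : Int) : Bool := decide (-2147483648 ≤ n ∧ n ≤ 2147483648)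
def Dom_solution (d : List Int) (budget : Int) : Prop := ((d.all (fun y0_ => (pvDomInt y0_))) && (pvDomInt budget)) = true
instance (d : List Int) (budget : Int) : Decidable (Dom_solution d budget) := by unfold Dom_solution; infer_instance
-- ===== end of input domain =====

-- B sorts once and sums a prefix instead of A's repeated min()+remove() scans (A mutates
-- its list argument in place, B does not; the equivalence is about the return value).

-- ===== PORT A =====
-- A's while-loop: break on empty, budget -= min(d), break if negative, answer += 1, remove min.
def solLoopA (d : List Int) (budget : Int) (answer : Int) : Int :=
  match _h : PySem.List.min? d (fun x => x) with
  | none => answer                      -- len(d) == 0: break  (min? = none iff empty)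
  | some m =>
    let budget' := budget - m
    if budget' < 0 then answer
    else
      match h2 : PySem.List.remove? d m with
      | none => answer                  -- unreachable: min(d) ∈ d, so remove never raises
      | some d' => solLoopA d' budget' (answer + 1)
termination_by d.length
decreasing_by
  have hm : m ∈ d := PySem.List.min?_mem _h
  rw [PySem.List.remove?_eq_some_erase d m hm] at h2
  cases h2
  have h1 := List.length_erase_of_mem hm
  have h2 := List.length_pos_of_mem hm
  omega

def solution (d : List Int) (budget : Int) : Int := solLoopA d budget 0

-- ===== PORT B =====
def greedyB (l : List Int) (budget : Int) (answer : Int) : Int :=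
  match l with
  | [] => answer
  | c :: rest =>
    let b' := budget - c
    if b' < 0 then answer else greedyB rest b' (answer + 1)

def solution_alt (d : List Int) (budget : Int) : Int :=
  greedyB (PySem.List.sorted d (fun x => x) false) budget 0

-- ===== PRECONDITION & SPEC =====
def Spec_solution (d : List Int) (budget : Int) (out : Int) : Prop := out = solution_alt d budget
instance (d : List Int) (budget : Int) (out : Int) : Decidable (Spec_solution d budget out) := by unfold Spec_solution; infer_instance

-- ===== CLAIM (what is proved, stated in full; the proofs are below) =====
def Claim_equal_solution : Prop := ∀ (d : List Int) (budget : Int), Dom_solution d budget → Spec_solution d budget (solution d budget)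

-- ===== LEMMAS AND PROOFS =====

-- A's loop run on any permutation of a ≤-sorted list e computes B's greedy pass over e.
theorem solLoopA_eq_greedyB (e : List Int) : ∀ (d : List Int) (budget answer : Int),
    d.Perm e → e.Pairwise (· ≤ ·) → solLoopA d budget answer = greedyB e budget answer := by
  induction e with
  | nil =>
    intro d budget answer hp _
    have hd : d = [] := List.Perm.eq_nil hp
    subst hd
    rw [solLoopA.eq_def]
    simp [greedyB, PySem.List.min?]
  | cons m t ih =>
    intro d budget answer hp hpw
    have hmd : m ∈ d := hp.mem_iff.mpr (List.mem_cons_self ..)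
    have hne : d ≠ [] := by intro h; subst h; exact absurd hmd (List.not_mem_nil)
    -- min? d = some m₀ with m₀ = m (Int values: the minimum value is unique)
    obtain ⟨m₀, hm₀⟩ : ∃ m₀, PySem.List.min? d (fun x => x) = some m₀ := by
      cases hmin : PySem.List.min? d (fun x => x) with
      | none => exact absurd ((PySem.List.min?_eq_none_iff d (fun x => x)).mp hmin) hne
      | some v => exact ⟨v, rfl⟩
    have hm₀d : m₀ ∈ d := PySem.List.min?_mem hm₀
    have hle1 : m₀ ≤ m := PySem.List.min?_isMin hm₀ m hmd
    have hle2 : m ≤ m₀ := by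
      have hm₀e : m₀ ∈ m :: t := hp.mem_iff.mp hm₀d
      rcases List.mem_cons.mp hm₀e with h | h
      · exact le_of_eq h.symm
      · exact (List.pairwise_cons.mp hpw).1 m₀ h
    have hmm : m₀ = m := le_antisymm hle1 hle2
    subst hmm
    have hrem : PySem.List.remove? d m₀ = some (d.erase m₀) :=
      PySem.List.remove?_eq_some_erase d m₀ hm₀d
    rw [solLoopA.eq_def, hm₀]
    simp only [greedyB]
    by_cases hb : budget - m₀ < 0
    · simp [hb]
    · simp only [hb, if_false]
      rw [hrem]
      have hperm : (d.erase m₀).Perm t := by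
        have := hp.erase m₀
        rwa [List.erase_cons_head] at this
      exact ih (d.erase m₀) (budget - m₀) (answer + 1) hperm (List.pairwise_cons.mp hpw).2

-- ===== VERDICT (by name: the statement is the Claim_ definition above) =====
theorem solution_spec : Claim_equal_solution := by
  intro d budget _
  unfold Spec_solution solution solution_alt
  exact solLoopA_eq_greedyB (PySem.List.sorted d (fun x => x) false) d budget 0
    (PySem.List.sorted_perm d (fun x => x) false).symm
    (PySem.List.sorted_pairwise d (fun x => x))
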